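-- pv_equiv track=rewrite | github.com/wo1fsea/PyTexturePacker | PyTexturePacker/MaxRectsBinPacker/Packer.py | cal_init_size
-- ===== SOURCE A (Python) =====
-- SIZE_SEQUENCE = [2 ** ind for ind in range(32)]
--
-- def cal_init_size(area, min_side_len=0, max_side_len=SIZE_SEQUENCE[-1], force_square=False):
--     start_i = 0
--
--     for i, l in enumerate(SIZE_SEQUENCE):
--         if l >= min_side_len:
--             start_i = i
--             break
--
--     if force_square:
--         for i, l in enumerate(SIZE_SEQUENCE):
--             if i < start_i:
--                 continue
--             if area <= l * l:
--                 return tuple((l if l < max_side_len else max_side_len, l if l < max_side_len else max_side_len))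
--     else:
--         for i, l in enumerate(SIZE_SEQUENCE):
--             if i < start_i:
--                 continue
--             for j in range(0, i + 1):
--                 l2 = SIZE_SEQUENCE[j]
--                 if area <= l * l2:
--                     return tuple((l if l < max_side_len else max_side_len, l2 if l2 < max_side_len else max_side_len))
--
--     return tuple((max_side_len, max_side_len))
-- ===== SOURCE B (Python) =====
-- SIZE_SEQUENCE = [2 ** ind for ind in range(32)]
--
--
-- def cal_init_size(area, min_side_len=0, max_side_len=SIZE_SEQUENCE[-1], force_square=False):
--     start_i = next((i for i, s in enumerate(SIZE_SEQUENCE) if s >= min_side_len), 0)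
--
--     def cap(v):
--         return v if v < max_side_len else max_side_len
--
--     if force_square:
--         for l in SIZE_SEQUENCE[start_i:]:
--             if area <= l * l:
--                 return (cap(l), cap(l))
--         return (max_side_len, max_side_len)
--
--     # two sequential passes instead of a nested scan:
--     # first the smallest admissible l with area <= l*l, then the smallest l2 with area <= l*l2
--     l = next((s for s in SIZE_SEQUENCE[start_i:] if area <= s * s), None)
--     if l is None:
--         return (max_side_len, max_side_len)
--     for l2 in SIZE_SEQUENCE:
--         if area <= l * l2:
--             return (cap(l), cap(l2))
--     return (max_side_len, max_side_len)
-- ===== Notes on version B (the rewrite author's own statement) =====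
-- stated objective: simpler
-- what changed: The nested i/j scan over SIZE_SEQUENCE is replaced by two sequential passes: first find the smallest l with area <= l*l at or after start_i, then find the smallest l2 with area <= l*l2; this works because the sequence is increasing, so the inner scan succeeds exactly when area <= l*l.
import Mathlib
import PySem

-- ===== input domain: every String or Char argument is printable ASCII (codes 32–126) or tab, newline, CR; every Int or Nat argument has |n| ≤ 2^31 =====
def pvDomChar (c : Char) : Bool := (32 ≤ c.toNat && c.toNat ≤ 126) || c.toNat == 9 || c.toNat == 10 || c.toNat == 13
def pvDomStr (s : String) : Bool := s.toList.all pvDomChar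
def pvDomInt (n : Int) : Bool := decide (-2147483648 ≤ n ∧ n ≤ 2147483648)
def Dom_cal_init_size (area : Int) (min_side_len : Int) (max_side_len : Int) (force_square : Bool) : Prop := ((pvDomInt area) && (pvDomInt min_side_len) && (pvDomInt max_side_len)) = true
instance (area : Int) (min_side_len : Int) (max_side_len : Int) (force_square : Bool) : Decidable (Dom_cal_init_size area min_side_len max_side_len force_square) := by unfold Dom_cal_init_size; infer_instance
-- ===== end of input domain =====

-- B replaces A's nested i/j scan over SIZE_SEQUENCE by two sequential first-match passes (simpler); same return value everywhere.

-- ===== PORT A =====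

-- SIZE_SEQUENCE = [2 ** ind for ind in range(32)]
def sizeSeq : List Int := (List.range 32).map (fun ind => (2 : Int) ^ ind)

-- `l if l < max_side_len else max_side_len`
def capA (maxL v : Int) : Int := if v < maxL then v else maxL

-- Python's enumerate(xs) starting at index k (k = 0 at the call site)
def pyEnum (k : Nat) : List Int → List (Nat × Int)
  | [] => []
  | x :: xs => (k, x) :: pyEnum (k + 1) xs

-- `for i, l in enumerate(SIZE_SEQUENCE): if l >= min_side_len: start_i = i; break` (start_i stays 0 if no break)
def firstGE (msl : Int) : List (Nat × Int) → Nat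
  | [] => 0
  | (i, l) :: rest => if msl ≤ l then i else firstGE msl rest

-- inner loop `for j in range(0, i+1): l2 = SIZE_SEQUENCE[j] …`; SIZE_SEQUENCE[j] for j in range(0, i+1)
-- is exactly the list sizeSeq.take (i+1) (all indices are in range), passed in at the call site
def innerA (area maxL l : Int) : List Int → Option (Int × Int)
  | [] => none
  | l2 :: rest => if area ≤ l * l2 then some (capA maxL l, capA maxL l2) else innerA area maxL l rest

-- outer loop of the non-square branch (`continue` when i < start_i); none = fell through to the final return
def outerA (area maxL : Int) (si : Nat) : List (Nat × Int) → Option (Int × Int)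
  | [] => none
  | (i, l) :: rest =>
    if i < si then outerA area maxL si rest
    else
      match innerA area maxL l (sizeSeq.take (i + 1)) with
      | some r => some r
      | none => outerA area maxL si rest

-- the force_square loop
def sqA (area maxL : Int) (si : Nat) : List (Nat × Int) → Option (Int × Int)
  | [] => none
  | (i, l) :: rest =>
    if i < si then sqA area maxL si rest
    else if area ≤ l * l then some (capA maxL l, capA maxL l) else sqA area maxL si rest

def cal_init_size (area : Int) (min_side_len : Int) (max_side_len : Int) (force_square : Bool) : Int × Int :=
  let start_i := firstGE min_side_len (pyEnum 0 sizeSeq)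
  if force_square then
    (sqA area max_side_len start_i (pyEnum 0 sizeSeq)).getD (max_side_len, max_side_len)
  else
    (outerA area max_side_len start_i (pyEnum 0 sizeSeq)).getD (max_side_len, max_side_len)

-- ===== PORT B =====

-- Source B: start_i = next((i for i, s in enumerate(SIZE_SEQUENCE) if s >= min_side_len), 0);
-- then either the single force_square scan, or two sequential first-match passes.
def cal_init_size_alt (area : Int) (min_side_len : Int) (max_side_len : Int) (force_square : Bool) : Int × Int :=
  let start_i := (sizeSeq.findIdx? (fun s => decide (min_side_len ≤ s))).getD 0
  let cap := fun v => if v < max_side_len then v else max_side_len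
  if force_square then
    match (sizeSeq.drop start_i).find? (fun l => decide (area ≤ l * l)) with
    | some l => (cap l, cap l)
    | none => (max_side_len, max_side_len)
  else
    match (sizeSeq.drop start_i).find? (fun l => decide (area ≤ l * l)) with
    | none => (max_side_len, max_side_len)
    | some l =>
      match sizeSeq.find? (fun l2 => decide (area ≤ l * l2)) with
      | some l2 => (cap l, cap l2)
      | none => (max_side_len, max_side_len)

-- ===== PRECONDITION & SPEC =====
def Spec_cal_init_size (area : Int) (min_side_len : Int) (max_side_len : Int) (force_square : Bool) (out : Int × Int) : Prop := out = cal_init_size_alt area min_side_len max_side_len force_square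
instance (area : Int) (min_side_len : Int) (max_side_len : Int) (force_square : Bool) (out : Int × Int) : Decidable (Spec_cal_init_size area min_side_len max_side_len force_square out) := by unfold Spec_cal_init_size; infer_instance

-- ===== CLAIM (what is proved, stated in full; the proofs are below) =====
def Claim_equal_cal_init_size : Prop := ∀ (area : Int) (min_side_len : Int) (max_side_len : Int) (force_square : Bool), Dom_cal_init_size area min_side_len max_side_len force_square → Spec_cal_init_size area min_side_len max_side_len force_square (cal_init_size area min_side_len max_side_len force_square)

-- ===== LEMMAS AND PROOFS =====

theorem sizeSeq_length : sizeSeq.length = 32 := by simp [sizeSeq]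

theorem sizeSeq_getElem (k : Nat) (hk : k < 32) : sizeSeq[k]'(by simp [sizeSeq_length, hk]) = (2 : Int) ^ k := by
  simp [sizeSeq]

theorem sizeSeq_drop_cons (k : Nat) (hk : k < 32) :
    sizeSeq.drop k = (2 : Int) ^ k :: sizeSeq.drop (k + 1) := by
  rw [List.drop_eq_getElem_cons (by simp [sizeSeq_length, hk]), sizeSeq_getElem k hk]

theorem sizeSeq_take (k : Nat) : sizeSeq.take (k + 1) = (List.range (min (k + 1) 32)).map (fun ind => (2 : Int) ^ ind) := by
  rw [sizeSeq, ← List.map_take, List.take_range]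

theorem mem_sizeSeq_take {x : Int} {k : Nat} (hx : x ∈ sizeSeq.take (k + 1)) :
    ∃ m, m ≤ k ∧ x = (2 : Int) ^ m := by
  rw [sizeSeq_take] at hx
  simp only [List.mem_map, List.mem_range] at hx
  obtain ⟨m, hm, rfl⟩ := hx
  exact ⟨m, by omega, rfl⟩

theorem pow_mem_sizeSeq_take (k : Nat) (hk : k < 32) : (2 : Int) ^ k ∈ sizeSeq.take (k + 1) := by
  rw [sizeSeq_take]
  simp only [List.mem_map, List.mem_range]
  exact ⟨k, by omega, rfl⟩

-- innerA is first-match over its list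
theorem innerA_eq_find (area maxL l : Int) (js : List Int) :
    innerA area maxL l js =
      (js.find? (fun l2 => decide (area ≤ l * l2))).map (fun l2 => (capA maxL l, capA maxL l2)) := by
  induction js with
  | nil => rfl
  | cons j rest ih =>
    by_cases h : area ≤ l * j <;> simp [innerA, List.find?_cons, h, ih]

theorem pyEnum_append (xs ys : List Int) (k : Nat) :
    pyEnum k (xs ++ ys) = pyEnum k xs ++ pyEnum (k + xs.length) ys := by
  induction xs generalizing k with
  | nil => simp [pyEnum]
  | cons x xs ih => simp [pyEnum, ih, Nat.add_assoc, Nat.add_comm 1 xs.length]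

theorem pyEnum_fst_lt {p : Nat × Int} {k : Nat} {xs : List Int} (hp : p ∈ pyEnum k xs) :
    p.1 < k + xs.length := by
  induction xs generalizing k with
  | nil => simp [pyEnum] at hp
  | cons x xs ih =>
    simp only [pyEnum, List.mem_cons] at hp
    rcases hp with rfl | hp
    · simp
    · have := ih hp; simp at this ⊢; omega

theorem firstGE_eq (msl : Int) (ls : List Int) (k : Nat) :
    firstGE msl (pyEnum k ls) =
      (match ls.findIdx? (fun s => decide (msl ≤ s)) with
       | some i => i + k
       | none => 0) := by
  induction ls generalizing k with
  | nil => rfl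
  | cons l rest ih =>
    simp only [pyEnum, firstGE, List.findIdx?_cons]
    by_cases h : msl ≤ l
    · simp [h]
    · simp only [h, decide_false, Bool.false_eq_true, if_false, ih]
      cases hf : rest.findIdx? (fun s => decide (msl ≤ s)) with
      | none => simp
      | some i => simp; ring

theorem startI_le (msl : Int) : firstGE msl (pyEnum 0 sizeSeq) ≤ 32 := by
  rw [firstGE_eq]
  cases h : sizeSeq.findIdx? (fun s => decide (msl ≤ s)) with
  | none => simp
  | some i =>
    have := (List.findIdx?_eq_some_iff_findIdx_eq.mp h).1
    rw [sizeSeq_length] at this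
    simp; omega

theorem outerA_skip (area maxL : Int) (si : Nat) (pairs rest : List (Nat × Int))
    (h : ∀ p ∈ pairs, p.1 < si) :
    outerA area maxL si (pairs ++ rest) = outerA area maxL si rest := by
  induction pairs with
  | nil => rfl
  | cons p ps ih =>
    obtain ⟨i, l⟩ := p
    have hi : i < si := h (i, l) (List.mem_cons_self)
    simp only [List.cons_append, outerA, hi, if_true]
    exact ih fun q hq => h q (List.mem_cons_of_mem _ hq)

theorem sqA_skip (area maxL : Int) (si : Nat) (pairs rest : List (Nat × Int))
    (h : ∀ p ∈ pairs, p.1 < si) :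
    sqA area maxL si (pairs ++ rest) = sqA area maxL si rest := by
  induction pairs with
  | nil => rfl
  | cons p ps ih =>
    obtain ⟨i, l⟩ := p
    have hi : i < si := h (i, l) (List.mem_cons_self)
    simp only [List.cons_append, sqA, hi, if_true]
    exact ih fun q hq => h q (List.mem_cons_of_mem _ hq)

theorem sqA_eq (area maxL : Int) (si : Nat) :
    ∀ (m k : Nat), k + m = 32 → si ≤ k →
      sqA area maxL si (pyEnum k (sizeSeq.drop k)) =
        ((sizeSeq.drop k).find? (fun l => decide (area ≤ l * l))).map
          (fun l => (capA maxL l, capA maxL l)) := by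
  intro m
  induction m with
  | zero =>
    intro k hk _
    have : sizeSeq.drop k = [] := by
      apply List.drop_eq_nil_of_le; rw [sizeSeq_length]; omega
    simp [this, pyEnum, sqA]
  | succ m ih =>
    intro k hk hsi
    have hk32 : k < 32 := by omega
    rw [sizeSeq_drop_cons k hk32]
    simp only [pyEnum, sqA, List.find?_cons]
    have hns : ¬ k < si := by omega
    by_cases h : area ≤ (2 : Int) ^ k * (2 : Int) ^ k
    · simp [hns, h]
    · simp only [hns, if_false, h, decide_false]
      exact ih (k + 1) (by omega) (by omega)

theorem outerA_eq (area maxL : Int) (si : Nat) :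
    ∀ (m k : Nat), k + m = 32 → si ≤ k →
      outerA area maxL si (pyEnum k (sizeSeq.drop k)) =
        (match (sizeSeq.drop k).find? (fun l => decide (area ≤ l * l)) with
         | some l => (sizeSeq.find? (fun l2 => decide (area ≤ l * l2))).map
             (fun l2 => (capA maxL l, capA maxL l2))
         | none => none) := by
  intro m
  induction m with
  | zero =>
    intro k hk _
    have : sizeSeq.drop k = [] := by
      apply List.drop_eq_nil_of_le; rw [sizeSeq_length]; omega
    simp [this, pyEnum, outerA]
  | succ m ih =>
    intro k hk hsi
    have hk32 : k < 32 := by omega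
    rw [sizeSeq_drop_cons k hk32]
    simp only [pyEnum, outerA, List.find?_cons]
    have hns : ¬ k < si := by omega
    rw [innerA_eq_find]
    by_cases h : area ≤ (2 : Int) ^ k * (2 : Int) ^ k
    · -- the inner scan succeeds within the prefix; prefix find = global find
      have hsome : ((sizeSeq.take (k + 1)).find? (fun l2 => decide (area ≤ (2:Int) ^ k * l2))).isSome := by
        rw [List.find?_isSome]
        exact ⟨(2 : Int) ^ k, pow_mem_sizeSeq_take k hk32, by simpa using h⟩
      have hglob : sizeSeq.find? (fun l2 => decide (area ≤ (2:Int) ^ k * l2)) =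
          (sizeSeq.take (k + 1)).find? (fun l2 => decide (area ≤ (2:Int) ^ k * l2)) := by
        conv_lhs => rw [← List.take_append_drop (k + 1) sizeSeq]
        rw [List.find?_append]
        cases hfs : (sizeSeq.take (k + 1)).find? (fun l2 => decide (area ≤ (2:Int) ^ k * l2)) with
        | none => rw [hfs] at hsome; simp at hsome
        | some v => simp
      simp only [hns, if_false, h, decide_true, hglob]
      cases hfs : (sizeSeq.take (k + 1)).find? (fun l2 => decide (area ≤ (2:Int) ^ k * l2)) with
      | none => rw [hfs] at hsome; simp at hsome
      | some v => simp
    · -- no element of the prefix works, since 2^k is its maximum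
      have hnone : (sizeSeq.take (k + 1)).find? (fun l2 => decide (area ≤ (2:Int) ^ k * l2)) = none := by
        rw [List.find?_eq_none]
        intro x hx
        obtain ⟨mm, hmle, rfl⟩ := mem_sizeSeq_take hx
        simp only [decide_eq_true_eq]
        intro hc
        apply h
        calc area ≤ (2:Int) ^ k * (2:Int) ^ mm := hc
          _ ≤ (2:Int) ^ k * (2:Int) ^ k := by
              apply mul_le_mul_of_nonneg_left (pow_le_pow_right₀ (by norm_num) hmle) (by positivity)
      simp only [hns, if_false, hnone, Option.map_none, h, decide_false]
      exact ih (k + 1) (by omega) (by omega)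

-- the enumerate over the whole list, with the skip, equals the enumerate of the suffix
theorem pyEnum_split (si : Nat) (hsi : si ≤ 32) :
    pyEnum 0 sizeSeq = pyEnum 0 (sizeSeq.take si) ++ pyEnum si (sizeSeq.drop si) := by
  conv_lhs => rw [← List.take_append_drop si sizeSeq]
  rw [pyEnum_append]
  congr 2
  simp [sizeSeq_length]
  omega

theorem take_indices_lt (si : Nat) : ∀ p ∈ pyEnum 0 (sizeSeq.take si), p.1 < si := by
  intro p hp
  have := pyEnum_fst_lt hp
  have hlen : (sizeSeq.take si).length ≤ si := by simp [sizeSeq_length]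
  omega

-- ===== VERDICT (by name: the statement is the Claim_ definition above) =====
theorem cal_init_size_spec : Claim_equal_cal_init_size := by
  intro area min_side_len max_side_len force_square _
  unfold Spec_cal_init_size cal_init_size cal_init_size_alt
  have hsi_eq : firstGE min_side_len (pyEnum 0 sizeSeq) =
      (sizeSeq.findIdx? (fun s => decide (min_side_len ≤ s))).getD 0 := by
    rw [firstGE_eq]
    cases sizeSeq.findIdx? (fun s => decide (min_side_len ≤ s)) <;> simp
  set si := firstGE min_side_len (pyEnum 0 sizeSeq) with hsi
  rw [← hsi_eq]
  have hle : si ≤ 32 := startI_le min_side_len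
  cases force_square with
  | true =>
    simp only [if_true]
    rw [pyEnum_split si hle, sqA_skip _ _ _ _ _ (take_indices_lt si),
        sqA_eq area max_side_len si (32 - si) si (by omega) (le_refl si)]
    cases (sizeSeq.drop si).find? (fun l => decide (area ≤ l * l)) <;> simp [capA]
  | false =>
    simp only [Bool.false_eq_true, if_false]
    rw [pyEnum_split si hle, outerA_skip _ _ _ _ _ (take_indices_lt si),
        outerA_eq area max_side_len si (32 - si) si (by omega) (le_refl si)]
    cases (sizeSeq.drop si).find? (fun l => decide (area ≤ l * l)) with
    | none => simp
    | some l =>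
      cases hf : sizeSeq.find? (fun l2 => decide (area ≤ l * l2)) <;> simp [hf, capA]
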